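-- pv_equiv track=rewrite | github.com/NineTailed9/Coder | matrix_operations.py | matrix_columns_swap_by_list
-- ===== SOURCE A (Python) =====
-- def matrix_columns_swap_by_list(primary_matrix: list, p=list):
--     columns = len(primary_matrix[0])
--     rows = len(primary_matrix)
--
--     new_matrix = []
--     for row_index in range(0, rows):
--         new_matrix.append([])
--         for column_index in range(0, columns):
--             new_matrix[row_index].append(0)
--
--     for i in range(0, len(p)):
--         prev_column = p[i][0]
--         future_column = p[i][1]
--
--         for row_index in range(0, rows):
--             new_matrix[row_index][future_column] = primary_matrix[row_index][
--                 prev_column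
--             ]
--
--     return new_matrix
-- ===== SOURCE B (Python) =====
-- def matrix_columns_swap_by_list(primary_matrix: list, p=list):
--     rows = len(primary_matrix)
--     columns = len(primary_matrix[0])
--     out_columns = [[0] * rows for _ in range(columns)]
--     for pair in p:
--         out_columns[pair[1]] = [row[pair[0]] for row in primary_matrix]
--     return [[col[i] for col in out_columns] for i in range(rows)]
-- ===== Notes on version B (the rewrite author's own statement) =====
-- stated objective: alternative
-- what changed: Builds the result column-major — a list of output columns initialized to zero, each pair overwriting one whole column extracted from the source column, followed by a transpose into rows — instead of A's preallocated row-major matrix with per-pair per-row scatter writes.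
import Mathlib
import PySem

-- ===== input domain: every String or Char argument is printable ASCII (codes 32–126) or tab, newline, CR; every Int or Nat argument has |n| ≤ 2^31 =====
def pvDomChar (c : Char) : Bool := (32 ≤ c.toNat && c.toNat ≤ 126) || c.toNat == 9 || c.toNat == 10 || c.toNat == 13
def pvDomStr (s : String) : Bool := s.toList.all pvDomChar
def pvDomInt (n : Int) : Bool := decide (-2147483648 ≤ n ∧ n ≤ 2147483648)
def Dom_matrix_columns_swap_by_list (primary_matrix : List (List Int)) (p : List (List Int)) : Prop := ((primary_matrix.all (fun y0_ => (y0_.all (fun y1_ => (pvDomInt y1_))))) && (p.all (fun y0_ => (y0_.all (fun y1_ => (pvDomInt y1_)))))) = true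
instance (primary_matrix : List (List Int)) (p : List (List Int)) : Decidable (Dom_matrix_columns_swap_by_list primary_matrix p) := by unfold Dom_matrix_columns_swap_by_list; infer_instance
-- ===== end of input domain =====

-- B builds the result column-major (one output column per destination, each pair overwriting a
-- whole column, then a transpose) instead of A's row-major zero matrix with per-pair per-row
-- scatter writes; same return value wherever A returns.

-- ===== PORT A =====
def matrix_columns_swap_by_list (primary_matrix : List (List Int)) (p : List (List Int)) : List (List Int) :=
  let columns := (PySem.List.pyGetD primary_matrix 0 []).length
  let rows := primary_matrix.length
  let new0 : List (List Int) :=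
    (PySem.List.pyRange 0 rows 1).foldl (fun m _ =>
      m ++ [(PySem.List.pyRange 0 columns 1).foldl (fun r _ => r ++ [(0 : Int)]) []]) []
  (PySem.List.pyRange 0 p.length 1).foldl (fun m i =>
    let pair := PySem.List.pyGetD p i []
    let prev_column := PySem.List.pyGetD pair 0 0
    let future_column := PySem.List.pyGetD pair 1 0
    (PySem.List.pyRange 0 rows 1).foldl (fun m r =>
      PySem.List.pySetD m r
        (PySem.List.pySetD (PySem.List.pyGetD m r []) future_column
          (PySem.List.pyGetD (PySem.List.pyGetD primary_matrix r []) prev_column 0))) m) new0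


-- ===== PORT B =====
def matrix_columns_swap_by_list_alt (primary_matrix : List (List Int)) (p : List (List Int)) : List (List Int) :=
  let rows := primary_matrix.length
  let columns := (PySem.List.pyGetD primary_matrix 0 []).length
  let out_columns0 : List (List Int) :=
    (PySem.List.pyRange 0 columns 1).map (fun _ => List.replicate rows (0 : Int))
  let out_columns :=
    p.foldl (fun oc pair =>
      PySem.List.pySetD oc (PySem.List.pyGetD pair 1 0)
        (primary_matrix.map (fun row => PySem.List.pyGetD row (PySem.List.pyGetD pair 0 0) 0)))
      out_columns0
  (PySem.List.pyRange 0 rows 1).map (fun i =>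
    out_columns.map (fun col => PySem.List.pyGetD col i 0))


-- ===== PRECONDITION & SPEC =====
-- Pre_ is exactly A's return domain: A raises IndexError on an empty matrix, on a pair shorter
-- than 2, on a destination column outside [-columns, columns), or on a source column outside
-- some row's range; it excludes no input on which A returns.
def Pre_matrix_columns_swap_by_list (primary_matrix : List (List Int)) (p : List (List Int)) : Prop :=
  primary_matrix ≠ [] ∧
  ∀ pr ∈ p, 2 ≤ pr.length ∧
    (-((primary_matrix.headI.length : Int)) ≤ pr.getD 1 0 ∧ pr.getD 1 0 < (primary_matrix.headI.length : Int)) ∧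
    ∀ row ∈ primary_matrix, -((row.length : Int)) ≤ pr.getD 0 0 ∧ pr.getD 0 0 < (row.length : Int)
instance (primary_matrix : List (List Int)) (p : List (List Int)) : Decidable (Pre_matrix_columns_swap_by_list primary_matrix p) := by unfold Pre_matrix_columns_swap_by_list; infer_instance
def pvWitness_matrix_columns_swap_by_list : List (List Int) × List (List Int) :=
  ([[1, 2, 3], [4, 5, 6]], [[0, 2], [-1, 0], [2, 0]])

def Spec_matrix_columns_swap_by_list (primary_matrix : List (List Int)) (p : List (List Int)) (out : List (List Int)) : Prop := out = matrix_columns_swap_by_list_alt primary_matrix p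
instance (primary_matrix : List (List Int)) (p : List (List Int)) (out : List (List Int)) : Decidable (Spec_matrix_columns_swap_by_list primary_matrix p out) := by unfold Spec_matrix_columns_swap_by_list; infer_instance

-- ===== CLAIM (what is proved, stated in full; the proofs are below) =====
def Claim_equal_matrix_columns_swap_by_list : Prop := ∀ (primary_matrix : List (List Int)) (p : List (List Int)), Dom_matrix_columns_swap_by_list primary_matrix p → Pre_matrix_columns_swap_by_list primary_matrix p → Spec_matrix_columns_swap_by_list primary_matrix p (matrix_columns_swap_by_list primary_matrix p)
-- ===== LEMMAS AND PROOFS =====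

theorem pvFoldAppend {α : Type} (n : Nat) (x : α) (init : List α) :
    (PySem.List.pyRange 0 (n:Int) 1).foldl (fun r (_ : Int) => r ++ [x]) init = init ++ List.replicate n x := by
  induction n with
  | zero => simp
  | succ k ih =>
    have : ((k+1:Nat):Int) = (k:Int)+1 := by push_cast; ring
    rw [this, PySem.List.pyRange_one_succ_right (by omega), List.foldl_append]
    simp only [List.foldl_cons, List.foldl_nil]
    rw [show PySem.List.pyRange 0 (k:Int) 1 = PySem.List.pyRange 0 (k:Int) from rfl] at *
    rw [ih, List.replicate_succ']
    simp

theorem pvSetGetD {α : Type} (row : List α) (fc : Int) (v : α) (d : α) (c : Nat) (hc : c < row.length)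
    (h1 : -(row.length:Int) ≤ fc) (h2 : fc < (row.length:Int)) :
    (PySem.List.pySetD row fc v).getD c d
      = if (c:Int) = PySem.Int.mod fc (row.length:Int) then v else row.getD c d := by
  have hpos : (0:Int) < row.length := by omega
  rw [PySem.Int.mod_eq_emod_of_pos hpos]
  by_cases h0 : 0 ≤ fc
  · rw [PySem.List.pySetD_of_nonneg row v h0, Int.emod_eq_of_lt h0 h2]
    simp only [List.getD_eq_getElem?_getD, List.getElem?_set]
    split_ifs with ha hb <;> simp_all <;> omega
  · have hmod : fc % (row.length:Int) = fc + row.length := by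
      have : (fc + row.length) % (row.length:Int) = fc % row.length := Int.add_emod_right fc _
      rw [← this, Int.emod_eq_of_lt (by omega) (by omega)]
    rw [hmod]
    have : PySem.List.pySetD row fc v = row.set (fc + row.length).toNat v := by
      simp only [PySem.List.pySetD, PySem.List.pySet?, PySem.List.pyIdx?, h0, if_false,
        if_pos (show -(row.length:Int) ≤ fc from h1)]
      simp
      congr 1
      omega
    rw [this]
    simp only [List.getD_eq_getElem?_getD, List.getElem?_set]
    split_ifs with ha hb <;> simp_all <;> omega

theorem pvInnerEq (pm : List (List Int)) (pc fc : Int) :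
    ∀ (n : Nat) (m : List (List Int)), n ≤ m.length →
    (PySem.List.pyRange 0 (n:Int) 1).foldl
      (fun m r => PySem.List.pySetD m r
          (PySem.List.pySetD (PySem.List.pyGetD m r []) fc
            (PySem.List.pyGetD (PySem.List.pyGetD pm r []) pc 0))) m
    = m.zipIdx.map (fun q => if q.2 < n then
        PySem.List.pySetD q.1 fc (PySem.List.pyGetD (PySem.List.pyGetD pm (q.2:Int) []) pc 0) else q.1) := by
  intro n
  induction n with
  | zero =>
    intro m _
    simp
  | succ k ih =>
    intro m hn
    have hcast : ((k+1:Nat):Int) = (k:Int)+1 := by push_cast; ring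
    rw [hcast, PySem.List.pyRange_one_succ_right (by omega), List.foldl_append]
    rw [show PySem.List.pyRange 0 (k:Int) 1 = PySem.List.pyRange 0 (k:Int) from rfl]
    rw [ih m (by omega)]
    simp only [List.foldl_cons, List.foldl_nil]
    set M := m.zipIdx.map (fun q => if q.2 < k then
        PySem.List.pySetD q.1 fc (PySem.List.pyGetD (PySem.List.pyGetD pm (q.2:Int) []) pc 0) else q.1) with hM
    have hMlen : M.length = m.length := by simp [hM]
    have hk : k < m.length := by omega
    have hMk : M.getD k [] = m[k] := by
      simp [hM, List.getD_eq_getElem?_getD, List.getElem?_eq_getElem hk]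
    rw [PySem.List.pyGetD_natCast, PySem.List.pySetD_natCast, hMk]
    apply List.ext_getElem
    · simp [hMlen]
    · intro i hi1 hi2
      simp only [List.length_set, hMlen] at hi1
      by_cases hik : i = k
      · subst hik
        simp [hM]
      · simp [List.getElem_set, hM]
        split_ifs <;> simp_all <;> omega

def pvScatter (pm : List (List Int)) (q : List (List Int)) (m : List (List Int)) : List (List Int) :=
  q.foldl (fun m pr =>
    (PySem.List.pyRange 0 ((pm.length : Nat) : Int) 1).foldl
      (fun m r => PySem.List.pySetD m r
        (PySem.List.pySetD (PySem.List.pyGetD m r []) (PySem.List.pyGetD pr 1 0)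
          (PySem.List.pyGetD (PySem.List.pyGetD pm r []) (PySem.List.pyGetD pr 0 0) 0))) m) m

theorem pvOuter (pm : List (List Int)) (cols : Nat) :
    ∀ (q : List (List Int)) (m : List (List Int)),
    m.length = pm.length →
    (∀ r : Nat, r < m.length → (m.getD r []).length = cols) →
    (∀ pr ∈ q, -((cols:Int)) ≤ PySem.List.pyGetD pr 1 0 ∧ PySem.List.pyGetD pr 1 0 < (cols:Int)) →
    (pvScatter pm q m).length = pm.length ∧
    (∀ r : Nat, r < pm.length → ((pvScatter pm q m).getD r []).length = cols) ∧
    (∀ r c : Nat, r < pm.length → c < cols →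
        ((pvScatter pm q m).getD r []).getD c 0
          = q.foldl (fun a pr => if (c:Int) = PySem.Int.mod (PySem.List.pyGetD pr 1 0) (cols:Int)
              then PySem.List.pyGetD (PySem.List.pyGetD pm (r:Int) []) (PySem.List.pyGetD pr 0 0) 0 else a)
              ((m.getD r []).getD c 0)) := by
  intro q
  induction q with
  | nil =>
    intro m hmlen hmrow _
    have he : pvScatter pm [] m = m := rfl
    rw [he]
    exact ⟨hmlen, fun r hr => hmrow r (by omega), fun r c hr hc => by rw [List.foldl_nil]⟩
  | cons pr q ih =>
    intro m hmlen hmrow hq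
    have hbounds := hq pr (by simp)
    have hstep := pvInnerEq pm (PySem.List.pyGetD pr 0 0) (PySem.List.pyGetD pr 1 0) pm.length m (by omega)
    have hcons : pvScatter pm (pr :: q) m = pvScatter pm q
        ((PySem.List.pyRange 0 ((pm.length : Nat) : Int) 1).foldl
          (fun m r => PySem.List.pySetD m r
            (PySem.List.pySetD (PySem.List.pyGetD m r []) (PySem.List.pyGetD pr 1 0)
              (PySem.List.pyGetD (PySem.List.pyGetD pm r []) (PySem.List.pyGetD pr 0 0) 0))) m) := rfl
    rw [hcons, hstep]
    set M := m.zipIdx.map (fun q => if q.2 < pm.length then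
        PySem.List.pySetD q.1 (PySem.List.pyGetD pr 1 0)
          (PySem.List.pyGetD (PySem.List.pyGetD pm (q.2:Int) []) (PySem.List.pyGetD pr 0 0) 0) else q.1) with hM
    have hMlen : M.length = pm.length := by simp [hM, hmlen]
    have hMget : ∀ r : Nat, r < pm.length → M.getD r [] =
        PySem.List.pySetD (m.getD r []) (PySem.List.pyGetD pr 1 0)
          (PySem.List.pyGetD (PySem.List.pyGetD pm (r:Int) []) (PySem.List.pyGetD pr 0 0) 0) := by
      intro r hr
      have hr' : r < m.length := by omega
      have hrM : r < M.length := by omega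
      rw [List.getD_eq_getElem?_getD, List.getElem?_eq_getElem hrM]
      simp [hM, List.getElem_zipIdx, hr, hr', List.getD_eq_getElem?_getD]
    have hMrow : ∀ r : Nat, r < M.length → (M.getD r []).length = cols := by
      intro r hr
      rw [hMget r (by omega), PySem.List.length_pySetD]
      exact hmrow r (by omega)
    obtain ⟨h1, h2, h3⟩ := ih M (by omega) hMrow (fun x hx => hq x (by simp [hx]))
    refine ⟨h1, h2, fun r c hr hc => ?_⟩
    rw [h3 r c hr hc, hMget r hr, List.foldl_cons]
    congr 1
    have hrowlen : (m.getD r []).length = cols := hmrow r (by omega)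
    rw [pvSetGetD _ _ _ _ c (by omega) (by rw [hrowlen]; exact_mod_cast hbounds.1)
        (by rw [hrowlen]; exact_mod_cast hbounds.2), hrowlen]

-- B-side: the column fold pushed to one column
theorem pvColFold (pm : List (List Int)) (cols : Nat) (c : Nat) (hc : c < cols) :
    ∀ (q : List (List Int)) (oc : List (List Int)), oc.length = cols →
    (∀ pr ∈ q, -((cols:Int)) ≤ PySem.List.pyGetD pr 1 0 ∧ PySem.List.pyGetD pr 1 0 < (cols:Int)) →
    (q.foldl (fun oc pr =>
        PySem.List.pySetD oc (PySem.List.pyGetD pr 1 0)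
          (pm.map (fun row => PySem.List.pyGetD row (PySem.List.pyGetD pr 0 0) 0))) oc).getD c []
    = q.foldl (fun col pr => if (c:Int) = PySem.Int.mod (PySem.List.pyGetD pr 1 0) (cols:Int)
        then pm.map (fun row => PySem.List.pyGetD row (PySem.List.pyGetD pr 0 0) 0) else col)
        (oc.getD c []) := by
  intro q
  induction q with
  | nil => intro oc _ _; rfl
  | cons pr q ih =>
    intro oc hlen hq
    have hb := hq pr (by simp)
    simp only [List.foldl_cons]
    rw [ih _ (by rw [PySem.List.length_pySetD]; exact hlen) (fun x hx => hq x (by simp [hx]))]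
    congr 1
    rw [pvSetGetD _ _ _ _ c (by omega) (by rw [hlen]; exact hb.1) (by rw [hlen]; exact hb.2), hlen]

-- push a function through an overwrite fold
theorem pvIfPush {α β : Type} (g : α → β) (cols : Nat) (c : Nat)
    (f : List Int → α) :
    ∀ (q : List (List Int)) (a : α),
    g (q.foldl (fun col pr => if (c:Int) = PySem.Int.mod (PySem.List.pyGetD pr 1 0) (cols:Int)
        then f pr else col) a)
    = q.foldl (fun x pr => if (c:Int) = PySem.Int.mod (PySem.List.pyGetD pr 1 0) (cols:Int)
        then g (f pr) else x) (g a) := by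
  intro q
  induction q with
  | nil => intro a; rfl
  | cons pr q ih =>
    intro a
    simp only [List.foldl_cons]
    rw [ih]
    congr 1
    by_cases h : (c:Int) = PySem.Int.mod (PySem.List.pyGetD pr 1 0) (cols:Int) <;> simp [h]

theorem pvGetD_eq {α : Type} (l : List α) (d : α) (r : Nat) (h : r < l.length) :
    l.getD r d = l[r] := by
  rw [List.getD_eq_getElem?_getD, List.getElem?_eq_getElem h]; rfl

theorem pvMain (pm p : List (List Int))
    (hne : pm ≠ [])
    (hp : ∀ pr ∈ p, 2 ≤ pr.length ∧
      (-((pm.headI.length : Int)) ≤ pr.getD 1 0 ∧ pr.getD 1 0 < (pm.headI.length : Int)) ∧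
      ∀ row ∈ pm, -((row.length : Int)) ≤ pr.getD 0 0 ∧ pr.getD 0 0 < (row.length : Int)) :
    matrix_columns_swap_by_list pm p = matrix_columns_swap_by_list_alt pm p := by
  have hhead : PySem.List.pyGetD pm 0 [] = pm.headI := by
    cases pm with
    | nil => exact absurd rfl hne
    | cons a l => rw [PySem.List.pyGetD_zero]; rfl
  have hvalid : ∀ pr ∈ p,
      -(((PySem.List.pyGetD pm 0 []).length : Int)) ≤ PySem.List.pyGetD pr 1 0 ∧
      PySem.List.pyGetD pr 1 0 < ((PySem.List.pyGetD pm 0 []).length : Int) := by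
    intro pr hpr
    obtain ⟨hlen2, ⟨hb1, hb2⟩, -⟩ := hp pr hpr
    have h1 : PySem.List.pyGetD pr 1 0 = pr.getD 1 0 := by
      rw [show (1:Int) = ((1:Nat):Int) from rfl, PySem.List.pyGetD_natCast]
    rw [h1, hhead]; exact ⟨hb1, hb2⟩
  simp only [matrix_columns_swap_by_list, matrix_columns_swap_by_list_alt]
  simp only [pvFoldAppend, List.nil_append]
  have hA := PySem.List.foldl_pyRange_zero_pyGetD' p ([] : List Int)
      (fun m pr =>
        (PySem.List.pyRange 0 ((pm.length : Nat) : Int) 1).foldl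
          (fun m r => PySem.List.pySetD m r
            (PySem.List.pySetD (PySem.List.pyGetD m r []) (PySem.List.pyGetD pr 1 0)
              (PySem.List.pyGetD (PySem.List.pyGetD pm r []) (PySem.List.pyGetD pr 0 0) 0))) m)
      (List.replicate pm.length (List.replicate (PySem.List.pyGetD pm 0 []).length 0))
  simp only [hA]
  set cols := (PySem.List.pyGetD pm 0 []).length with hcols
  obtain ⟨h1, h2, h3⟩ := pvOuter pm cols p
      (List.replicate pm.length (List.replicate cols 0))
      (by simp)
      (by intro r hr
          simp only [List.length_replicate] at hr
          rw [pvGetD_eq _ _ r (by simpa using hr)]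
          simp)
      hvalid
  simp only [pvScatter] at h1 h2 h3
  -- B side entry characterization
  set OC := p.foldl (fun oc pair =>
      PySem.List.pySetD oc (PySem.List.pyGetD pair 1 0)
        (pm.map (fun row => PySem.List.pyGetD row (PySem.List.pyGetD pair 0 0) 0)))
      ((PySem.List.pyRange 0 (cols:Int) 1).map (fun _ => List.replicate pm.length (0:Int))) with hOC
  have hOClen : OC.length = cols := by
    rw [hOC]
    have : ∀ (q : List (List Int)) (oc : List (List Int)),
        (q.foldl (fun oc pair =>
          PySem.List.pySetD oc (PySem.List.pyGetD pair 1 0)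
            (pm.map (fun row => PySem.List.pyGetD row (PySem.List.pyGetD pair 0 0) 0))) oc).length = oc.length := by
      intro q
      induction q with
      | nil => intro oc; rfl
      | cons x q ih => intro oc; simp only [List.foldl_cons]; rw [ih, PySem.List.length_pySetD]
    rw [this]
    simp [PySem.List.pyRange_zero_natCast]
  conv_rhs => rw [PySem.List.pyRange_zero_natCast, List.map_map]
  apply List.ext_getElem
  · rw [h1]
    simp
  · intro r hr1 hr2
    have hrpm : r < pm.length := by rw [h1] at hr1; exact hr1
    rw [List.getElem_map, List.getElem_range, Function.comp_apply]
    rw [← pvGetD_eq _ _ r hr1]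
    apply List.ext_getElem
    · rw [h2 r hrpm, List.length_map, hOClen]
    · intro c hc1 hc2
      have hcc : c < cols := by rw [h2 r hrpm] at hc1; exact hc1
      have hz : ((List.replicate pm.length (List.replicate cols (0:Int))).getD r []).getD c 0 = (0:Int) := by
        rw [pvGetD_eq _ _ r (by simpa using hrpm)]
        simp
      rw [← pvGetD_eq _ _ c hc1, h3 r c hrpm hcc, hz]
      rw [List.getElem_map]
      have hOCinit : ((PySem.List.pyRange 0 (cols:Int) 1).map
          (fun _ => List.replicate pm.length (0:Int))).length = cols := by
        simp [PySem.List.pyRange_zero_natCast]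
      have hcol : OC[c] = OC.getD c [] := (pvGetD_eq OC [] c (by omega)).symm
      rw [hcol, hOC, pvColFold pm cols c hcc p _ hOCinit hvalid]
      have hg := pvIfPush (fun col : List Int => PySem.List.pyGetD col (r:Int) 0) cols c
        (fun pr => pm.map (fun row => PySem.List.pyGetD row (PySem.List.pyGetD pr 0 0) 0)) p
        (((PySem.List.pyRange 0 (cols:Int) 1).map (fun _ => List.replicate pm.length (0:Int))).getD c [])
      rw [hg]
      have hinitc : ((PySem.List.pyRange 0 (cols:Int) 1).map
          (fun _ => List.replicate pm.length (0:Int))).getD c [] = List.replicate pm.length (0:Int) := by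
        rw [pvGetD_eq _ _ c (by rw [hOCinit]; exact hcc)]
        simp
      rw [hinitc]
      have hstart : PySem.List.pyGetD (List.replicate pm.length (0:Int)) (r:Int) 0 = 0 := by
        rw [PySem.List.pyGetD_natCast]
        simp
      rw [hstart]
      apply PySem.List.foldl_congr_mem
      intro a pr hpr
      have hbranch : PySem.List.pyGetD
          (pm.map (fun row => PySem.List.pyGetD row (PySem.List.pyGetD pr 0 0) 0)) (r:Int) 0
          = PySem.List.pyGetD (PySem.List.pyGetD pm (r:Int) []) (PySem.List.pyGetD pr 0 0) 0 := by
        rw [PySem.List.pyGetD_natCast, PySem.List.pyGetD_natCast,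
          pvGetD_eq _ _ r (by simp [hrpm]), List.getElem_map, pvGetD_eq pm [] r hrpm]
      rw [hbranch]


-- ===== VERDICT (by name: the statement is the Claim_ definition above) =====
theorem matrix_columns_swap_by_list_spec : Claim_equal_matrix_columns_swap_by_list := by
  intro primary_matrix p _dom hpre
  unfold Spec_matrix_columns_swap_by_list
  exact pvMain primary_matrix p hpre.1 hpre.2
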